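-- pv_equiv track=rewrite | github.com/jacgonisa/CENprofiler | bin/extract_reads_from_bam.py | classify_position
-- ===== SOURCE A (Python) =====
-- def classify_position(chrom, pos, regions):
--     """
--     Classify genomic position by region.
--     Priority: 5s_rdna > 45s_rdna > centromere > pericentromere > arms
--     """
--     if chrom not in regions:
--         return 'other'
--
--     # Check regions in priority order
--     priority_order = ['5s_rdna', '45s_rdna', 'centromere', 'pericentromere']
--
--     for region_type in priority_order:
--         for start, end, rtype in regions[chrom]:
--             if rtype == region_type and start <= pos < end:
--                 return region_type
--
--     # Default to arms if not in any special region
--     return 'arms'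
-- ===== SOURCE B (Python) =====
-- def classify_position(chrom, pos, regions):
--     if chrom not in regions:
--         return 'other'
--     hits = set()
--     for start, end, rtype in regions[chrom]:
--         if start <= pos < end:
--             hits.add(rtype)
--     for region_type in ('5s_rdna', '45s_rdna', 'centromere', 'pericentromere'):
--         if region_type in hits:
--             return region_type
--     return 'arms'
-- ===== Notes on version B (the rewrite author's own statement) =====
-- stated objective: simpler
-- what changed: Replaces A's up-to-four priority-ordered scans of the region list with one pass that collects the set of region types covering pos, followed by a single priority lookup.
import Mathlib
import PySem

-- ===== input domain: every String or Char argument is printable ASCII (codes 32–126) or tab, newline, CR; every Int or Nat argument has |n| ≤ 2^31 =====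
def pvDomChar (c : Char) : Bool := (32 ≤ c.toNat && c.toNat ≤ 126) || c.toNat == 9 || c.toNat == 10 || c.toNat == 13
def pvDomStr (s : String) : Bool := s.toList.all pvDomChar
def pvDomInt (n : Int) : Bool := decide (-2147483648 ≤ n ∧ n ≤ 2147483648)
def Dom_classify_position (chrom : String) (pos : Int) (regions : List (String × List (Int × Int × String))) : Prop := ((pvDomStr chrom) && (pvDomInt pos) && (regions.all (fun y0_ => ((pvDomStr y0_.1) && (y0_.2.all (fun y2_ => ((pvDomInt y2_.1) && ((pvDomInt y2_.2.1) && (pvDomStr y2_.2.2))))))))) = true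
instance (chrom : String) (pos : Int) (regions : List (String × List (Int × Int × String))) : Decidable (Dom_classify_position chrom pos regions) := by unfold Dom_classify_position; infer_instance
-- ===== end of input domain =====

-- B replaces A's up-to-four priority-ordered scans with one coverage pass plus a priority lookup (simpler decomposition).

-- ===== PORT A =====
def pvScanA (pos : Int) (rt : String) : List (Int × Int × String) → Option String
  | [] => none
  | (s, e, r) :: rest =>
      if r == rt && decide (s ≤ pos) && decide (pos < e) then some rt
      else pvScanA pos rt rest

def pvOuterA (pos : Int) (lst : List (Int × Int × String)) : List String → String
  | [] => "arms"
  | rt :: rts =>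
      match pvScanA pos rt lst with
      | some s => s
      | none => pvOuterA pos lst rts

def classify_position (chrom : String) (pos : Int) (regions : List (String × List (Int × Int × String))) : String :=
  match (PySem.Dict.mk regions).get? chrom with
  | none => "other"
  | some lst => pvOuterA pos lst ["5s_rdna", "45s_rdna", "centromere", "pericentromere"]

-- ===== PORT B =====
def pvHits (pos : Int) (lst : List (Int × Int × String)) : PySem.Set String :=
  lst.foldl (fun s t => if decide (t.1 ≤ pos) && decide (pos < t.2.1) then PySem.Set.add s t.2.2 else s)
    PySem.Set.empty

def pvFirstHit (hits : PySem.Set String) : List String → String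
  | [] => "arms"
  | rt :: rts => if PySem.Set.contains hits rt then rt else pvFirstHit hits rts

def classify_position_alt (chrom : String) (pos : Int) (regions : List (String × List (Int × Int × String))) : String :=
  match (PySem.Dict.mk regions).get? chrom with
  | none => "other"
  | some lst => pvFirstHit (pvHits pos lst) ["5s_rdna", "45s_rdna", "centromere", "pericentromere"]

-- ===== PRECONDITION & SPEC =====
def Spec_classify_position (chrom : String) (pos : Int) (regions : List (String × List (Int × Int × String))) (out : String) : Prop := out = classify_position_alt chrom pos regions
instance (chrom : String) (pos : Int) (regions : List (String × List (Int × Int × String))) (out : String) : Decidable (Spec_classify_position chrom pos regions out) := by unfold Spec_classify_position; infer_instance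

-- ===== CLAIM (what is proved, stated in full; the proofs are below) =====
def Claim_equal_classify_position : Prop := ∀ (chrom : String) (pos : Int) (regions : List (String × List (Int × Int × String))), Dom_classify_position chrom pos regions → Spec_classify_position chrom pos regions (classify_position chrom pos regions)

-- ===== LEMMAS AND PROOFS =====

lemma pvScanA_eq (pos : Int) (rt : String) (lst : List (Int × Int × String)) :
    pvScanA pos rt lst =
      if lst.any (fun t => t.2.2 == rt && decide (t.1 ≤ pos) && decide (pos < t.2.1))
      then some rt else none := by
  induction lst with
  | nil => simp [pvScanA]
  | cons h tl ih =>
      obtain ⟨s, e, r⟩ := h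
      by_cases hc : (r == rt && decide (s ≤ pos) && decide (pos < e)) = true
      · simp [pvScanA, hc]
      · simp only [pvScanA, List.any_cons]
        rw [if_neg hc, ih]
        simp only [Bool.eq_false_iff.mpr hc, Bool.false_or]

lemma pvHits_mem (pos : Int) (rt : String) (lst : List (Int × Int × String))
    (init : PySem.Set String) :
    rt ∈ lst.foldl (fun s t => if decide (t.1 ≤ pos) && decide (pos < t.2.1) then PySem.Set.add s t.2.2 else s) init
      ↔ rt ∈ init ∨ ∃ t ∈ lst, t.2.2 = rt ∧ t.1 ≤ pos ∧ pos < t.2.1 := by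
  induction lst generalizing init with
  | nil => simp
  | cons h tl ih =>
      obtain ⟨s, e, r⟩ := h
      simp only [List.foldl_cons]
      by_cases hin : s ≤ pos ∧ pos < e
      · rw [if_pos (by simp [hin.1, hin.2])]
        rw [ih]
        simp only [PySem.Set.mem_add, List.mem_cons]
        constructor
        · rintro (⟨hi | he⟩ | ht)
          · exact Or.inl hi
          · exact Or.inr ⟨(s, e, r), Or.inl rfl, he.symm, hin.1, hin.2⟩
          · obtain ⟨t, ht1, ht2⟩ := ht
            exact Or.inr ⟨t, Or.inr ht1, ht2⟩
        · rintro (hi | ⟨t, ht1 | ht1, ht2⟩)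
          · exact Or.inl (Or.inl hi)
          · subst ht1; exact Or.inl (Or.inr ht2.1.symm)
          · exact Or.inr ⟨t, ht1, ht2⟩
      · rw [if_neg (by simp; omega)]
        rw [ih]
        constructor
        · rintro (hi | ht)
          · exact Or.inl hi
          · obtain ⟨t, ht1, ht2⟩ := ht
            exact Or.inr ⟨t, List.mem_cons_of_mem _ ht1, ht2⟩
        · rintro (hi | ⟨t, ht1, ht2⟩)
          · exact Or.inl hi
          · rcases List.mem_cons.mp ht1 with h1 | h1
            · subst h1; exact absurd ⟨ht2.2.1, ht2.2.2⟩ hin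
            · exact Or.inr ⟨t, h1, ht2⟩

lemma pvOuter_eq_first (pos : Int) (lst : List (Int × Int × String)) (prios : List String) :
    pvOuterA pos lst prios = pvFirstHit (pvHits pos lst) prios := by
  induction prios with
  | nil => rfl
  | cons rt rts ih =>
      have hc : PySem.Set.contains (pvHits pos lst) rt
          = lst.any (fun t => t.2.2 == rt && decide (t.1 ≤ pos) && decide (pos < t.2.1)) := by
        rw [Bool.eq_iff_iff, PySem.Set.contains_iff, pvHits]
        rw [pvHits_mem]
        simp only [PySem.Set.empty, List.not_mem_nil, false_or, List.any_eq_true,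
          Bool.and_eq_true, beq_iff_eq, decide_eq_true_eq]
        constructor
        · rintro ⟨t, ht, h1, h2, h3⟩; exact ⟨t, ht, ⟨h1, h2⟩, h3⟩
        · rintro ⟨t, ht, ⟨h1, h2⟩, h3⟩; exact ⟨t, ht, h1, h2, h3⟩
      show (match pvScanA pos rt lst with
            | some s => s
            | none => pvOuterA pos lst rts)
          = (if PySem.Set.contains (pvHits pos lst) rt then rt else pvFirstHit (pvHits pos lst) rts)
      rw [pvScanA_eq, hc]
      cases h : lst.any (fun t => t.2.2 == rt && decide (t.1 ≤ pos) && decide (pos < t.2.1))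
      · simp [ih]
      · simp

-- ===== VERDICT (by name: the statement is the Claim_ definition above) =====
theorem classify_position_spec : Claim_equal_classify_position := by
  intro chrom pos regions _
  unfold Spec_classify_position classify_position classify_position_alt
  cases (PySem.Dict.mk regions).get? chrom with
  | none => rfl
  | some lst => exact pvOuter_eq_first pos lst _
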